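-- pv_equiv track=rewrite | github.com/vdumchiviy/just_interesting_tasks | codesignal_com/codesignal_com008.py | solution
-- ===== SOURCE A (Python) =====
-- def solution(s1: str, s2: str):
--     def recode(s):
--         dict_result = dict()
--         for letter in s:
--             dict_result[letter] = dict_result.get(letter, 0) + 1
--         return dict_result
--
--     d1 = recode(s1)
--     result = 0
--     for letter, count in d1.items():
--         result += min(count, s2.count(letter))
--     return result
-- ===== SOURCE B (Python) =====
-- def solution(s1: str, s2: str):
--     a = sorted(s1)
--     b = sorted(s2)
--     i = j = result = 0
--     while i < len(a) and j < len(b):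
--         if a[i] == b[j]:
--             result += 1
--             i += 1
--             j += 1
--         elif a[i] < b[j]:
--             i += 1
--         else:
--             j += 1
--     return result
-- ===== Notes on version B (the rewrite author's own statement) =====
-- stated objective: alternative
-- what changed: Replaced A's frequency-dict over s1 plus a full s2.count scan per distinct letter by sorting both strings and counting matches in a single two-pointer merge pass.
import Mathlib
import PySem

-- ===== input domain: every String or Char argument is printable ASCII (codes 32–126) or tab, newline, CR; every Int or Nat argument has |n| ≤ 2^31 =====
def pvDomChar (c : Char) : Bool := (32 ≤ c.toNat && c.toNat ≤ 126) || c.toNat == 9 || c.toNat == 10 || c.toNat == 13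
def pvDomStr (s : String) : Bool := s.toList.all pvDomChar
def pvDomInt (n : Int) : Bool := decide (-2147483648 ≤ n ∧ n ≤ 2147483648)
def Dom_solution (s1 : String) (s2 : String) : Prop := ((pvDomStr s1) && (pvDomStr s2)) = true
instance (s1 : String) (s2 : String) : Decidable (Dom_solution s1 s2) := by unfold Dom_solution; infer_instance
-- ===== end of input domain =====

-- B sorts both strings and counts common letters in one two-pointer merge pass,
-- instead of A's frequency dict plus an s2.count scan per distinct letter (alternative algorithm; return values proved equal).

-- ===== PORT A =====
-- inner helper recode(s): dict_result[letter] = dict_result.get(letter, 0) + 1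
def pvRecode (s : List Char) : PySem.Dict Char Int :=
  s.foldl (fun d letter => d.insert letter (d.getD letter 0 + 1)) PySem.Dict.empty

-- s2.count(letter): str.count with a one-char needle counts exactly the occurrences of that char
def solution (s1 : String) (s2 : String) : Int :=
  let d1 := pvRecode s1.toList
  d1.items.foldl (fun result kv => result + min kv.2 (s2.toList.count kv.1 : Int)) 0

-- ===== PORT B =====
-- the while loop over indices i, j: recursion on the two (suffix) lists
def pvMergeCount : List Char → List Char → Int
  | [], _ => 0
  | _ :: _, [] => 0
  | x :: xs, y :: ys =>
    if x = y then 1 + pvMergeCount xs ys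
    else if x < y then pvMergeCount xs (y :: ys)
    else pvMergeCount (x :: xs) ys
termination_by a b => a.length + b.length

def solution_alt (s1 : String) (s2 : String) : Int :=
  pvMergeCount (PySem.List.sorted s1.toList (fun c => c) false)
               (PySem.List.sorted s2.toList (fun c => c) false)

-- ===== PRECONDITION & SPEC =====
def Spec_solution (s1 : String) (s2 : String) (out : Int) : Prop := out = solution_alt s1 s2
instance (s1 : String) (s2 : String) (out : Int) : Decidable (Spec_solution s1 s2 out) := by unfold Spec_solution; infer_instance

-- ===== CLAIM (what is proved, stated in full; the proofs are below) =====
def Claim_equal_solution : Prop := ∀ (s1 : String) (s2 : String), Dom_solution s1 s2 → Spec_solution s1 s2 (solution s1 s2)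

-- ===== LEMMAS AND PROOFS =====

-- B's merge on two ≤-sorted lists computes the size of the multiset intersection
theorem pvMergeCount_eq_card (l1 l2 : List Char) :
    l1.Pairwise (· ≤ ·) → l2.Pairwise (· ≤ ·) →
    pvMergeCount l1 l2 = (((l1 : Multiset Char) ∩ (l2 : Multiset Char)).card : Int) := by
  induction l1, l2 using pvMergeCount.induct with
  | case1 l2 => intro _ _; simp [pvMergeCount]
  | case2 x xs => intro _ _; simp [pvMergeCount]
  | case3 xs y ys ih =>
    intro h1 h2
    have hm : ((y :: xs : List Char) : Multiset Char) ∩ ↑(y :: ys)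
        = y ::ₘ ((xs : Multiset Char) ∩ (ys : Multiset Char)) := by
      rw [show ((y :: xs : List Char) : Multiset Char) = y ::ₘ (xs : Multiset Char) from rfl,
          show ((y :: ys : List Char) : Multiset Char) = y ::ₘ (ys : Multiset Char) from rfl,
          Multiset.cons_inter_of_pos _ (Multiset.mem_cons_self _ _), Multiset.erase_cons_head]
    simp only [pvMergeCount, hm, Multiset.card_cons,
      ih (List.pairwise_cons.mp h1).2 (List.pairwise_cons.mp h2).2]
    push_cast
    ring
  | case4 x xs y ys hne hlt ih =>
    intro h1 h2
    have hx : x ∉ ((y :: ys : List Char) : Multiset Char) := by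
      simp only [Multiset.mem_coe, List.mem_cons]
      rintro (rfl | hmem)
      · exact hne rfl
      · exact absurd ((List.pairwise_cons.mp h2).1 x hmem) (not_le.mpr hlt)
    have hm : ((x :: xs : List Char) : Multiset Char) ∩ ↑(y :: ys)
        = (xs : Multiset Char) ∩ ((y :: ys : List Char) : Multiset Char) := by
      rw [show ((x :: xs : List Char) : Multiset Char) = x ::ₘ (xs : Multiset Char) from rfl,
          Multiset.cons_inter_of_neg _ hx]
    simp only [pvMergeCount, if_neg hne, if_pos hlt, hm,
      ih (List.pairwise_cons.mp h1).2 h2]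
  | case5 x xs y ys hne hnlt ih =>
    intro h1 h2
    have hyx : y < x := lt_of_le_of_ne (not_lt.mp hnlt) (fun h => hne h.symm)
    have hy : y ∉ ((x :: xs : List Char) : Multiset Char) := by
      simp only [Multiset.mem_coe, List.mem_cons]
      rintro (rfl | hmem)
      · exact hne rfl
      · exact absurd ((List.pairwise_cons.mp h1).1 y hmem) (not_le.mpr hyx)
    have hm : ((x :: xs : List Char) : Multiset Char) ∩ ↑(y :: ys)
        = ((x :: xs : List Char) : Multiset Char) ∩ (ys : Multiset Char) := by
      rw [Multiset.inter_comm,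
          show ((y :: ys : List Char) : Multiset Char) = y ::ₘ (ys : Multiset Char) from rfl,
          Multiset.cons_inter_of_neg _ hy, Multiset.inter_comm]
    simp only [pvMergeCount, if_neg hne, if_neg hnlt, hm,
      ih h1 (List.pairwise_cons.mp h2).2]

-- the min-of-counts sum over the distinct letters of l1 is the multiset-intersection size
theorem sum_min_counts_eq_card (l1 l2 : List Char) :
    ((PySem.Set.ofList l1).map (fun k => min ((l1.count k : Nat) : Int) ((l2.count k : Nat) : Int))).sum
      = (((l1 : Multiset Char) ∩ (l2 : Multiset Char)).card : Int) := by
  have hmin : ∀ k ∈ PySem.Set.ofList l1,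
      min ((l1.count k : Nat) : Int) ((l2.count k : Nat) : Int)
        = ((fun n : Nat => (n : Int)) ∘ fun k => min (l1.count k) (l2.count k)) k := by
    intro k _; exact (Nat.cast_min ..).symm
  rw [List.map_congr_left hmin, ← List.map_map, ← Nat.cast_list_sum]
  congr 1
  have hnd : (PySem.Set.ofList l1).Nodup := PySem.Set.nodup_ofList l1
  have hS : (PySem.Set.ofList l1).toFinset.sum (fun k => min (l1.count k) (l2.count k))
      = ((PySem.Set.ofList l1).map (fun k => min (l1.count k) (l2.count k))).sum :=
    List.sum_toFinset _ hnd
  rw [← hS]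
  have hfin : (PySem.Set.ofList l1).toFinset = l1.toFinset := by
    ext a; simp [List.mem_toFinset, PySem.Set.mem_ofList]
  rw [hfin, ← Multiset.toFinset_sum_count_eq ((l1 : Multiset Char) ∩ (l2 : Multiset Char))]
  have hcongr : l1.toFinset.sum (fun k => min (l1.count k) (l2.count k))
      = l1.toFinset.sum (fun a => Multiset.count a ((l1 : Multiset Char) ∩ (l2 : Multiset Char))) :=
    Finset.sum_congr rfl (fun a _ => by
      rw [Multiset.count_inter, Multiset.coe_count, Multiset.coe_count])
  rw [hcongr]
  refine (Finset.sum_subset ?_ (fun a _ ha => ?_)).symm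
  · intro a ha
    rw [Multiset.mem_toFinset, Multiset.mem_inter] at ha
    rw [List.mem_toFinset, ← Multiset.mem_coe]
    exact ha.1
  · rw [Multiset.mem_toFinset] at ha
    exact Multiset.count_eq_zero.mpr ha

-- A's dict loop is the counter; its items fold is that same sum
theorem solution_eq_card (s1 s2 : String) :
    solution s1 s2 = (((s1.toList : Multiset Char) ∩ (s2.toList : Multiset Char)).card : Int) := by
  show (pvRecode s1.toList).items.foldl
      (fun result kv => result + min kv.2 (s2.toList.count kv.1 : Int)) 0 = _
  rw [show pvRecode s1.toList = PySem.Dict.counter s1.toList from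
        PySem.Dict.foldl_insert_getD_add_one_eq_counter s1.toList]
  rw [PySem.Dict.items_counter, PySem.List.foldl_add, List.map_map]
  rw [show ((fun kv : Char × Int => min kv.2 ((s2.toList.count kv.1 : Nat) : Int)) ∘
        fun k => (k, (s1.toList.count k : Int)))
      = fun k => min ((s1.toList.count k : Nat) : Int) ((s2.toList.count k : Nat) : Int) from rfl]
  rw [sum_min_counts_eq_card]
  ring

theorem solution_alt_eq_card (s1 s2 : String) :
    solution_alt s1 s2 = (((s1.toList : Multiset Char) ∩ (s2.toList : Multiset Char)).card : Int) := by
  unfold solution_alt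
  rw [pvMergeCount_eq_card _ _
        (PySem.List.sorted_pairwise s1.toList (fun c => c))
        (PySem.List.sorted_pairwise s2.toList (fun c => c))]
  rw [show ((PySem.List.sorted s1.toList (fun c => c) false : List Char) : Multiset Char)
        = (s1.toList : Multiset Char) from Multiset.coe_eq_coe.mpr (PySem.List.sorted_perm ..),
      show ((PySem.List.sorted s2.toList (fun c => c) false : List Char) : Multiset Char)
        = (s2.toList : Multiset Char) from Multiset.coe_eq_coe.mpr (PySem.List.sorted_perm ..)]

-- ===== VERDICT (by name: the statement is the Claim_ definition above) =====
theorem solution_spec : Claim_equal_solution := by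
  intro s1 s2 _
  unfold Spec_solution
  rw [solution_eq_card, solution_alt_eq_card]
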